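-- pv_equiv track=rewrite | github.com/DarkPr0digy/MORPH_SEGMENT | Conditional Random Fields/morphology/DataCleaner.py | normaliseOrthographicForm
-- ===== SOURCE A (Python) =====
-- def normaliseOrthographicForm(orthographic: str):
--     """Method to normalise the format of the orthographic form to make using it as input easier for the CRF"""
--     # Formats orthographic form into following format
--     # aa[bb]cc[dd]
--     str2_arr = []
--
--     # Removes Labels at the front of orthographic forms
--     if orthographic[0] == '[':
--         beginningLabel = True
--         while beginningLabel:
--             index = orthographic.find(']')
--             orthographic = orthographic[index + 1: len(orthographic)]
--             if orthographic[0] == '[':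
--                 continue
--             else:
--                 beginningLabel = False
--
--     # Removes extra character
--     for char in orthographic:
--         if char == '$' or char == '-':
--             continue
--         else:
--             str2_arr.append(char)
--
--     # Combines double labels
--     label = []
--     str = []
--     tag = False
--     for i in range(len(str2_arr)):
--         try:
--             double_label = str2_arr[i] == ']' and str2_arr[i + 1] == '['
--         except IndexError:
--             double_label = False
--
--         if str2_arr[i] == '[':
--             tag = True
--         elif double_label:
--             label.append('|')
--         elif str2_arr[i] == ']':
--             tag = False
--             str.append('[')
--             for char in label:
--                 str.append(char)
--             str.append(']')
--             label = []
--         elif tag: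
--             label.append(str2_arr[i])
--         else:
--             str.append(str2_arr[i])
--
--     tmp_ortho = "".join(str)
--
--     is_label = False
--     is_first_label_char = False
--     str = []
--
--     for char in tmp_ortho:
--         if char == "[":
--             is_label = True
--             is_first_label_char = True
--             str.append(char)
--         elif is_label and is_first_label_char:
--             str.append(char.upper())
--             is_first_label_char = False
--         elif is_label and char == "|":
--             is_first_label_char = True
--             str.append(char)
--         elif char == "]":
--             is_label = False
--             str.append(char)
--         elif is_label and char == "+":
--             str.append("|")
--         else:
--             str.append(char)
--
--     return "".join(str)
-- ===== SOURCE B (Python) =====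
-- def normaliseOrthographicForm(orthographic: str):
--     """One fused pass replacing A's three post-strip passes (label fold, intermediate join, casing pass)."""
--     # Leading-label stripping kept as in A (preserves its IndexError/edge behaviour).
--     if orthographic[0] == '[':
--         while True:
--             orthographic = orthographic[orthographic.find(']') + 1:]
--             if orthographic[0] != '[':
--                 break
--
--     t = [c for c in orthographic if c != '$' and c != '-']
--
--     out = []
--     is_label = False          # casing-pass state, maintained while streaming
--     is_first_label_char = False
--
--     def emit(c):
--         nonlocal is_label, is_first_label_char
--         if c == '[':
--             is_label = True
--             is_first_label_char = True
--             out.append(c)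
--         elif is_label and is_first_label_char:
--             out.append(c.upper())
--             is_first_label_char = False
--         elif is_label and c == '|':
--             is_first_label_char = True
--             out.append(c)
--         elif c == ']':
--             is_label = False
--             out.append(c)
--         elif is_label and c == '+':
--             out.append('|')
--         else:
--             out.append(c)
--
--     tag = False
--     label = []
--     n = len(t)
--     for i, c in enumerate(t):
--         nxt = t[i + 1] if i + 1 < n else None
--         if c == '[':
--             tag = True
--         elif c == ']' and nxt == '[':
--             label.append('|')
--         elif c == ']':
--             tag = False
--             emit('[')
--             for lc in label:
--                 emit(lc)
--             emit(']')
--             label = []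
--         elif tag:
--             label.append(c)
--         else:
--             emit(c)
--     return "".join(out)
-- ===== Notes on version B (the rewrite author's own statement) =====
-- stated objective: simpler
-- what changed: A's three post-strip passes (filter loop, double-label fold into an intermediate joined string, then a separate casing/'+'-rewrite pass) are fused into one streaming pass that emits each character through the casing step as it is produced, with no intermediate string builds; the leading-label stripping stage is kept as-is to preserve its exact edge behaviour.
import Mathlib
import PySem

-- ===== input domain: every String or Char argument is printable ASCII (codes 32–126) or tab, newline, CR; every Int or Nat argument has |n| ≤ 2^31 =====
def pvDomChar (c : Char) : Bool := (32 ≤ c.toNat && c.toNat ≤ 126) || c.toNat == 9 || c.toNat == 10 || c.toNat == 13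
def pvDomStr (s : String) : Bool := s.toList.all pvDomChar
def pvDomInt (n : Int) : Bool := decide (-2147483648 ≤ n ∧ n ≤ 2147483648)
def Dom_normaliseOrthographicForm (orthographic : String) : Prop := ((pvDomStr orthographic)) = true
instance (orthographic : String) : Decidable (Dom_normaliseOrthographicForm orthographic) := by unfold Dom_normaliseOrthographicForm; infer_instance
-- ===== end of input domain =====

-- B fuses A's three post-strip passes into one streaming pass (objective: simpler one-pass decomposition,
-- no asymptotic speed claim); the leading-label stripping stage is deliberately shared so that B raises /
-- loops exactly where A does (those inputs are outside Pre_).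

-- ===== PORT A =====

-- Leading-label stripping stage, shared verbatim by both ports (B keeps this stage as-is).
-- Python: while orthographic[0]=='[': cut after first ']' (str.find; -1 → slice is a no-op → the
-- Python loop never terminates; that case, and the empty-string IndexError, are outside Pre_ and
-- this total function returns the current string there).
def stripLabels (s : List Char) : List Char :=
  if h1 : s.head? = some '[' then
    match s.findIdx? (fun c => c = ']') with
    | none => s
    | some i => stripLabels (s.drop (i + 1))
  else s
termination_by s.length
decreasing_by
  have hs : s ≠ [] := by intro h'; subst h'; simp at h1
  have hp : 0 < s.length := List.length_pos_iff.mpr hs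
  simp only [List.length_drop]; omega

-- pass 2 of A: remove '$' and '-' (loop with append)
def pass2A (s : List Char) : List Char :=
  s.foldl (fun acc c => if c = '$' ∨ c = '-' then acc else acc ++ [c]) []

-- pass 3 of A: fold double labels; try/except IndexError on str2_arr[i+1] ≙ rest.head? lookahead
def p3A : List Char → List Char → List Char → Bool → List Char
  | [], _label, str, _tag => str
  | c :: rest, label, str, tag =>
    if c = '[' then p3A rest label str true
    else if c = ']' ∧ rest.head? = some '[' then p3A rest (label ++ ['|']) str tag
    else if c = ']' then p3A rest [] (str ++ '[' :: (label ++ [']'])) false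
    else if tag then p3A rest (label ++ [c]) str tag
    else p3A rest label (str ++ [c]) tag

-- pass 4 of A: uppercase the first label char, '+'→'|' inside labels
-- (char.upper() ported as PySem.Chars.upperChar, exact)
def p4A : List Char → Bool → Bool → List Char → List Char
  | [], _isLabel, _isFirst, str => str
  | c :: rest, isLabel, isFirst, str =>
    if c = '[' then p4A rest true true (str ++ [c])
    else if isLabel && isFirst then p4A rest isLabel false (str ++ [PySem.Chars.upperChar c])
    else if isLabel ∧ c = '|' then p4A rest isLabel true (str ++ [c])
    else if c = ']' then p4A rest false isFirst (str ++ [c])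
    else if isLabel ∧ c = '+' then p4A rest isLabel isFirst (str ++ ['|'])
    else p4A rest isLabel isFirst (str ++ [c])

def normaliseOrthographicForm (orthographic : String) : String :=
  let o := stripLabels orthographic.toList
  let str2 := pass2A o
  let tmp := p3A str2 [] [] false
  String.ofList (p4A tmp false false [])

-- ===== PORT B =====

-- Source B's emit(c): one streaming step of the casing pass; returns (out, is_label, is_first)
def emitB (c : Char) (isLabel isFirst : Bool) (out : List Char) : List Char × Bool × Bool :=
  if c = '[' then (out ++ [c], true, true)
  else if isLabel && isFirst then (out ++ [PySem.Chars.upperChar c], isLabel, false)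
  else if isLabel ∧ c = '|' then (out ++ [c], isLabel, true)
  else if c = ']' then (out ++ [c], false, isFirst)
  else if isLabel ∧ c = '+' then (out ++ ['|'], isLabel, isFirst)
  else (out ++ [c], isLabel, isFirst)

-- "emit('['); for lc in label: emit(lc); emit(']')" as one list of emits
def emitList : List Char → Bool → Bool → List Char → List Char × Bool × Bool
  | [], isLabel, isFirst, out => (out, isLabel, isFirst)
  | c :: rest, isLabel, isFirst, out =>
    let r := emitB c isLabel isFirst out
    emitList rest r.2.1 r.2.2 r.1

-- Source B's single fused loop over t (lookahead t[i+1] ≙ rest.head?)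
def bLoop : List Char → Bool → List Char → Bool → Bool → List Char → List Char
  | [], _tag, _label, _l, _f, out => out
  | c :: rest, tag, label, l, f, out =>
    if c = '[' then bLoop rest true label l f out
    else if c = ']' ∧ rest.head? = some '[' then bLoop rest tag (label ++ ['|']) l f out
    else if c = ']' then
      let r := emitList ('[' :: (label ++ [']'])) l f out
      bLoop rest false [] r.2.1 r.2.2 r.1
    else if tag then bLoop rest tag (label ++ [c]) l f out
    else
      let r := emitB c l f out
      bLoop rest tag label r.2.1 r.2.2 r.1

def normaliseOrthographicForm_alt (orthographic : String) : String :=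
  let t := (stripLabels orthographic.toList).filter (fun c => !(c == '$' || c == '-'))
  String.ofList (bLoop t false [] false false [])

-- ===== PRECONDITION & SPEC =====
-- Pre_ excludes exactly the inputs on which Python A does not return normally: the empty string
-- (IndexError), strings whose leading-label stripping leaves the empty string (IndexError), and
-- strings starting with '[' whose stripping never reaches a ']'-free position (the while loop
-- never terminates).  Stated via the ']'-split decomposition of the string, not by re-running A.
def Pre_normaliseOrthographicForm (orthographic : String) : Prop :=
  orthographic ≠ "" ∧
  (orthographic.toList.head? = some '[' →
    (let parts := orthographic.toList.splitOn ']'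
     let j := parts.findIdx (fun p => !(p.head? == some '['))
     j < parts.length ∧ (j + 1 < parts.length ∨ parts.getD j [] ≠ [])))
instance (orthographic : String) : Decidable (Pre_normaliseOrthographicForm orthographic) := by
  unfold Pre_normaliseOrthographicForm; infer_instance

def pvWitness_normaliseOrthographicForm : String := "[lab]ba[tt][xy]u+v"

def Spec_normaliseOrthographicForm (orthographic : String) (out : String) : Prop := out = normaliseOrthographicForm_alt orthographic
instance (orthographic : String) (out : String) : Decidable (Spec_normaliseOrthographicForm orthographic out) := by unfold Spec_normaliseOrthographicForm; infer_instance

-- ===== CLAIM (what is proved, stated in full; the proofs are below) =====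
def Claim_equal_normaliseOrthographicForm : Prop := ∀ (orthographic : String), Dom_normaliseOrthographicForm orthographic → Pre_normaliseOrthographicForm orthographic → Spec_normaliseOrthographicForm orthographic (normaliseOrthographicForm orthographic)

-- ===== LEMMAS AND PROOFS =====

-- A's remove-extra-characters loop is B's filter
theorem pass2A_eq_filter (s : List Char) : ∀ acc : List Char,
    s.foldl (fun acc c => if c = '$' ∨ c = '-' then acc else acc ++ [c]) acc
      = acc ++ s.filter (fun c => !(c == '$' || c == '-')) := by
  induction s with
  | nil => intro acc; simp
  | cons c s ih =>
    intro acc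
    by_cases h : c = '$' ∨ c = '-'
    · rcases h with h | h <;> subst h <;> simp [List.foldl, ih]
    · push_neg at h
      have h1 : (c == '$') = false := by simp [h.1]
      have h2 : (c == '-') = false := by simp [h.2]
      simp [List.foldl, ih, List.filter, h, h1, h2]

-- proof-side single step of the casing pass: emitted char and new state
def st4 (c : Char) (isLabel isFirst : Bool) : Char × Bool × Bool :=
  if c = '[' then (c, true, true)
  else if isLabel && isFirst then (PySem.Chars.upperChar c, isLabel, false)
  else if isLabel ∧ c = '|' then (c, isLabel, true)
  else if c = ']' then (c, false, isFirst)
  else if isLabel ∧ c = '+' then ('|', isLabel, isFirst)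
  else (c, isLabel, isFirst)

-- proof-side pure casing pass (output only) and its state fold
def q4 : List Char → Bool → Bool → List Char
  | [], _, _ => []
  | c :: rest, l, f => (st4 c l f).1 :: q4 rest (st4 c l f).2.1 (st4 c l f).2.2

def s4L : List Char → Bool → Bool → Bool × Bool
  | [], l, f => (l, f)
  | c :: rest, l, f => s4L rest (st4 c l f).2.1 (st4 c l f).2.2

theorem emitB_eq (c : Char) (l f : Bool) (out : List Char) :
    emitB c l f out = (out ++ [(st4 c l f).1], (st4 c l f).2) := by
  unfold emitB st4; split_ifs <;> rfl

theorem p4A_step (c : Char) (rest : List Char) (l f : Bool) (str : List Char) :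
    p4A (c :: rest) l f str = p4A rest (st4 c l f).2.1 (st4 c l f).2.2 (str ++ [(st4 c l f).1]) := by
  unfold st4
  split_ifs <;> (conv_lhs => rw [p4A]) <;> simp_all <;> cases l <;> simp_all

theorem p4A_eq (cs : List Char) : ∀ (l f : Bool) (str : List Char),
    p4A cs l f str = str ++ q4 cs l f := by
  induction cs with
  | nil => intro l f str; simp [p4A, q4]
  | cons c rest ih =>
    intro l f str
    rw [p4A_step, ih, q4]
    simp

theorem q4_append (xs : List Char) : ∀ (ys : List Char) (l f : Bool),
    q4 (xs ++ ys) l f = q4 xs l f ++ q4 ys (s4L xs l f).1 (s4L xs l f).2 := by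
  induction xs with
  | nil => intro ys l f; simp [q4, s4L]
  | cons c rest ih => intro ys l f; simp [q4, s4L, ih]

theorem emitList_eq (cs : List Char) : ∀ (l f : Bool) (out : List Char),
    emitList cs l f out = (out ++ q4 cs l f, s4L cs l f) := by
  induction cs with
  | nil => intro l f out; simp [emitList, q4, s4L]
  | cons c rest ih =>
    intro l f out
    rw [emitList, emitB_eq, ih]
    simp [q4, s4L]

-- proof-side pure double-label fold (output only)
def q3 : List Char → List Char → Bool → List Char
  | [], _label, _tag => []
  | c :: rest, label, tag =>
    if c = '[' then q3 rest label true
    else if c = ']' ∧ rest.head? = some '[' then q3 rest (label ++ ['|']) tag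
    else if c = ']' then ('[' :: (label ++ [']'])) ++ q3 rest [] false
    else if tag then q3 rest (label ++ [c]) tag
    else c :: q3 rest label tag

theorem p3A_eq (cs : List Char) : ∀ (label str : List Char) (tag : Bool),
    p3A cs label str tag = str ++ q3 cs label tag := by
  induction cs with
  | nil => intro label str tag; simp [p3A, q3]
  | cons c rest ih =>
    intro label str tag
    unfold p3A q3
    split_ifs <;> rw [ih] <;> simp

-- the fused loop of B computes the casing pass applied to the double-label fold
theorem bLoop_eq (cs : List Char) : ∀ (tag : Bool) (label : List Char) (l f : Bool) (out : List Char),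
    bLoop cs tag label l f out = out ++ q4 (q3 cs label tag) l f := by
  induction cs with
  | nil => intro tag label l f out; simp [bLoop, q3, q4]
  | cons c rest ih =>
    intro tag label l f out
    unfold bLoop q3
    split_ifs
    · rw [ih]
    · rw [ih]
    · rw [emitList_eq, ih, q4_append]; simp
    · rw [ih]
    · rw [emitB_eq, ih, q4]; simp

-- ===== VERDICT (by name: the statement is the Claim_ definition above) =====
theorem normaliseOrthographicForm_spec : Claim_equal_normaliseOrthographicForm := by
  unfold Claim_equal_normaliseOrthographicForm
  intro s _ _
  unfold Spec_normaliseOrthographicForm normaliseOrthographicForm normaliseOrthographicForm_alt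
  simp only []
  congr 1
  rw [bLoop_eq, p4A_eq, p3A_eq, pass2A, pass2A_eq_filter]
  simp
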